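-- pv_equiv track=rewrite | github.com/julia7julia/Alg | 22.py | getMaximumGenerated
-- ===== SOURCE A (Python) =====
-- def getMaximumGenerated(n):
--     if n == 0:
--         return 0
--     arr = [0, 1]
--     for i in range(2, n + 1):
--         if i % 2 == 0:
--             arr.append(arr[i // 2])
--         else:
--             arr.append(arr[i // 2] + arr[i // 2 + 1])
--     return max(arr)
-- ===== SOURCE B (Python) =====
-- def getMaximumGenerated(n):
--     if n == 0:
--         return 0
--     best = 1
--     block = [1]          # values at indices [2**k, 2**(k+1))
--     idx = 2              # first index of the next level
--     while idx <= n: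
--         block = [c for v, w in zip(block, block[1:] + [1]) for c in (v, v + w)]
--         best = max(best, max(block[:n - idx + 1]))
--         idx += len(block)
--     return best
-- ===== Notes on version B (the rewrite author's own statement) =====
-- stated objective: alternative
-- what changed: B replaces A's index-addressed bottom-up array fill with level-by-level generation: each block of values at indices [2^k, 2^(k+1)) is produced from the previous block by a pairwise zip (arr[2j]=arr[j], arr[2j+1]=arr[j]+arr[j+1]), keeping a running max per block instead of building the whole array and calling max once.
import Mathlib
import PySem

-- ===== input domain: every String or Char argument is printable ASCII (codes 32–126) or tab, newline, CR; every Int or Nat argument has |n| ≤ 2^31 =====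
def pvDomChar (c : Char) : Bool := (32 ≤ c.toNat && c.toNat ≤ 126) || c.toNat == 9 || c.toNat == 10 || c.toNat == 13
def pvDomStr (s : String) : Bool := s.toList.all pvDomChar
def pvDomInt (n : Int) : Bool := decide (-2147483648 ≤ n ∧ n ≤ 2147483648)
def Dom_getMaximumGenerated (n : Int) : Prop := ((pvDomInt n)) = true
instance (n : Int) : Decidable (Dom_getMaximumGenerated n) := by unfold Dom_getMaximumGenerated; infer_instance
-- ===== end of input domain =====

-- B replaces A's index-addressed array fill with level-by-level generation: each block of
-- values at indices [2^k, 2^(k+1)) is produced from the previous block by a pairwise zip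
-- (objective: alternative decomposition, same asymptotic cost).

-- ===== PORT A =====
-- arr[i//2] / arr[i//2+1]: the index is always in range (i//2+1 ≤ i < len(arr)), so pyGetD 0 is exact;
-- max(arr): arr is nonempty, so (max? arr).getD 0 is exact.
def getMaximumGenerated (n : Int) : Int :=
  if n = 0 then 0
  else
    let arr := (PySem.List.pyRange 2 (n + 1) 1).foldl
      (fun arr i =>
        if PySem.Int.mod i 2 = 0 then
          arr ++ [PySem.List.pyGetD arr (PySem.Int.floordiv i 2) 0]
        else
          arr ++ [PySem.List.pyGetD arr (PySem.Int.floordiv i 2) 0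
                  + PySem.List.pyGetD arr (PySem.Int.floordiv i 2 + 1) 0])
      [0, 1]
    (PySem.List.max? arr (fun x => x)).getD 0

-- ===== PORT B =====
-- the while loop, made structural on a fuel of n.toNat + 1 iterations: idx (≥ 2) grows by
-- len(block) ≥ 2 every iteration, so the guard idx ≤ n fails long before the fuel runs out
-- and the fuel-exhaustion branch is unreachable;
-- max(block[:n - idx + 1]): the slice is nonempty inside the loop (idx ≤ n and block ≠ []),
-- so (max? …).getD 0 is exact.
def altLoop (n : Int) : Nat → List Int → Int → Int → Int
  | 0, _, _, best => best
  | fuel + 1, block, idx, best =>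
    if idx ≤ n then
      let block' := (block.zip (PySem.List.slice block (some 1) none ++ [1])).flatMap
        (fun p => [p.1, p.1 + p.2])
      let best' := max best
        ((PySem.List.max? (PySem.List.slice block' none (some (n - idx + 1))) (fun x => x)).getD 0)
      altLoop n fuel block' (idx + PySem.List.len block') best'
    else best

def getMaximumGenerated_alt (n : Int) : Int :=
  if n = 0 then 0 else altLoop n (n.toNat + 1) [1] 2 1

-- ===== PRECONDITION & SPEC =====
def Spec_getMaximumGenerated (n : Int) (out : Int) : Prop := out = getMaximumGenerated_alt n
instance (n : Int) (out : Int) : Decidable (Spec_getMaximumGenerated n out) := by unfold Spec_getMaximumGenerated; infer_instance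

-- ===== CLAIM (what is proved, stated in full; the proofs are below) =====
def Claim_equal_getMaximumGenerated : Prop := ∀ (n : Int), Dom_getMaximumGenerated n → Spec_getMaximumGenerated n (getMaximumGenerated n)

-- ===== LEMMAS AND PROOFS =====

-- the pure sequence value: arr[i] in A, the level entries in B
def gval (i : Nat) : Int :=
  if i < 2 then (i : Int)
  else if i % 2 = 0 then gval (i / 2) else gval (i / 2) + gval (i / 2 + 1)
termination_by i
decreasing_by
  · omega
  · omega
  · omega

theorem gval_even {i : Nat} (h2 : ¬ i < 2) (hp : i % 2 = 0) : gval i = gval (i / 2) := by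
  rw [gval, if_neg h2, if_pos hp]

theorem gval_odd {i : Nat} (h2 : ¬ i < 2) (hp : ¬ i % 2 = 0) :
    gval i = gval (i / 2) + gval (i / 2 + 1) := by
  rw [gval, if_neg h2, if_neg hp]

theorem gval_zero : gval 0 = 0 := by rw [gval]; norm_num

theorem gval_one : gval 1 = 1 := by rw [gval]; norm_num

theorem gval_two_pow : ∀ k, gval (2 ^ k) = 1 := by
  intro k
  induction k with
  | zero => simpa using gval_one
  | succ k ih =>
    have h1 : (1 : Nat) ≤ 2 ^ k := Nat.one_le_two_pow
    rw [pow_succ, gval_even (by omega) (by omega), Nat.mul_div_cancel _ (by norm_num)]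
    exact ih

-- A's loop builds the map of gval over 0..k
theorem arr_spec (k : Nat) (hk : 1 ≤ k) :
    (PySem.List.pyRange 2 ((k : Int) + 1) 1).foldl
      (fun arr i =>
        if PySem.Int.mod i 2 = 0 then
          arr ++ [PySem.List.pyGetD arr (PySem.Int.floordiv i 2) 0]
        else
          arr ++ [PySem.List.pyGetD arr (PySem.Int.floordiv i 2) 0
                  + PySem.List.pyGetD arr (PySem.Int.floordiv i 2 + 1) 0])
      [0, 1]
    = (List.range (k + 1)).map gval := by
  induction k with
  | zero => omega
  | succ k ihk =>
    rcases Nat.lt_or_ge k 1 with h1 | h1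
    · interval_cases k
      rw [PySem.List.pyRange_one_eq_nil (by omega)]
      simp [List.range_succ, gval]
    · have hsplit : PySem.List.pyRange 2 (((k + 1 : Nat) : Int) + 1) 1
          = PySem.List.pyRange 2 ((k : Int) + 1) 1 ++ [((k + 1 : Nat) : Int)] := by
        push_cast
        rw [show ((k : Int) + 1 + 1) = ((k : Int) + 1) + 1 by ring,
          PySem.List.pyRange_one_succ_right (by omega)]
      rw [hsplit, List.foldl_append, ihk h1]
      simp only [List.foldl_cons, List.foldl_nil]
      have hfd : PySem.Int.floordiv ((k + 1 : Nat) : Int) 2 = (((k + 1) / 2 : Nat) : Int) := by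
        exact_mod_cast PySem.Int.floordiv_natCast (k + 1) 2
      have hmd : PySem.Int.mod ((k + 1 : Nat) : Int) 2 = (((k + 1) % 2 : Nat) : Int) := by
        exact_mod_cast PySem.Int.mod_natCast (k + 1) 2
      have hget : ∀ (j : Nat), j < k + 1 →
          PySem.List.pyGetD ((List.range (k + 1)).map gval) ((j : Nat) : Int) 0 = gval j := by
        intro j hj
        rw [PySem.List.pyGetD_natCast]
        simp [List.getD, hj]
      by_cases hpar : (k + 1) % 2 = 0
      · rw [hmd]
        simp only [hpar, Nat.cast_zero, if_true, hfd]
        rw [hget _ (by omega)]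
        conv_rhs => rw [List.range_succ, List.map_append]
        congr 1
        simp only [List.map_cons, List.map_nil]
        rw [gval_even (i := k + 1) (by omega) hpar]
      · rw [hmd]
        have : (((k + 1) % 2 : Nat) : Int) ≠ 0 := by
          omega
        simp only [this, if_false, hfd]
        have hcast : (((k + 1) / 2 : Nat) : Int) + 1 = (((k + 1) / 2 + 1 : Nat) : Int) := by
          push_cast; ring
        rw [hcast, hget _ (by omega), hget _ (by omega)]
        conv_rhs => rw [List.range_succ, List.map_append]
        congr 1
        simp only [List.map_cons, List.map_nil]
        rw [gval_odd (i := k + 1) (by omega) hpar]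

-- running max over 0..m of the sequence values
def bestVal (m : Nat) : Int := ((List.range (m + 1)).map gval).foldl max 0

theorem foldl_max_max (l : List Int) : ∀ (a b : Int), l.foldl max (max a b) = max a (l.foldl max b) := by
  induction l with
  | nil => intro a b; rfl
  | cons x t ih =>
    intro a b
    simp only [List.foldl_cons]
    rw [max_assoc, ih]

theorem maxD_cons_nonneg (x : Int) (l : List Int) (hx : 0 ≤ x) :
    (PySem.List.max? (x :: l) (fun y => y)).getD 0 = (x :: l).foldl max 0 := by
  rw [PySem.List.max?_id_cons]
  simp only [Option.getD_some, List.foldl_cons]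
  rw [max_eq_right hx]

theorem bestVal_nonneg (m : Nat) : 0 ≤ bestVal m := by
  unfold bestVal
  exact (PySem.List.le_foldl_max _ 0).1

-- pairwise doubling: the flatMap over a range produces the doubled range
theorem range_double (F : Nat → Int) : ∀ p : Nat,
    (List.range p).flatMap (fun t => [F (2 * t), F (2 * t + 1)]) = (List.range (2 * p)).map F := by
  intro p
  induction p with
  | zero => simp
  | succ p ih =>
    rw [List.range_succ, List.flatMap_append, ih]
    have h : 2 * (p + 1) = (2 * p + 1) + 1 := by ring
    rw [h, List.range_succ, List.range_succ]
    simp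

-- one level step of B: from the block at [p, 2p) to the block at [2p, 4p)
theorem level_step (p : Nat) (hp : 1 ≤ p) (h2p : gval (2 * p) = 1) :
    ((((List.range p).map (fun t => gval (p + t))).zip
       (PySem.List.slice ((List.range p).map (fun t => gval (p + t))) (some 1) none ++ [1])).flatMap
       (fun pr => [pr.1, pr.1 + pr.2]))
    = (List.range (2 * p)).map (fun t => gval (2 * p + t)) := by
  rw [PySem.List.slice_from_one]
  have htail : (((List.range p).map (fun t => gval (p + t))).tail ++ [(1 : Int)])
      = (List.range p).map (fun t => gval (p + t + 1)) := by
    obtain ⟨q, rfl⟩ : ∃ q, p = q + 1 := ⟨p - 1, by omega⟩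
    conv_lhs => rw [List.range_succ_eq_map]
    conv_rhs => rw [List.range_succ]
    simp only [List.map_cons, List.tail_cons, List.map_map, List.map_append, List.map_nil]
    congr 1
    rw [show q + 1 + q + 1 = 2 * (q + 1) by ring, h2p]
  rw [htail, List.zip_map']
  have hcongr : (((List.range p).map (fun t => (gval (p + t), gval (p + t + 1)))).flatMap
      (fun pr : Int × Int => [pr.1, pr.1 + pr.2]))
      = (List.range p).flatMap (fun t => [gval (2 * p + 2 * t), gval (2 * p + 2 * t + 1)]) := by
    rw [List.flatMap_def, List.map_map, List.flatMap_def]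
    congr 1
    apply List.map_congr_left
    intro t ht
    simp only [Function.comp]
    have he : gval (2 * p + 2 * t) = gval (p + t) := by
      rw [show 2 * p + 2 * t = 2 * (p + t) by ring,
        gval_even (by omega) (by omega)]
      congr 1
      omega
    have ho : gval (2 * p + 2 * t + 1) = gval (p + t) + gval (p + t + 1) := by
      rw [show 2 * p + 2 * t + 1 = 2 * (p + t) + 1 by ring,
        gval_odd (by omega) (by omega)]
      congr 2 <;> omega
    rw [he, ho]
  rw [hcongr]
  have h := range_double (fun s => gval (2 * p + s)) p
  simpa using h

-- the loop invariant: entering an iteration with block = values at [2^k, 2^(k+1)),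
-- idx = 2^(k+1) and best = max over indices 0..min(n, idx-1), the loop returns bestVal n
theorem altLoop_inv (n : Int) (hn : 1 ≤ n) : ∀ (fuel k : Nat) (best : Int),
    best = bestVal (min n.toNat (2 * 2 ^ k - 1)) →
    n.toNat < 2 ^ (k + fuel) →
    altLoop n fuel ((List.range (2 ^ k)).map (fun t => gval (2 ^ k + t)))
      ((2 * 2 ^ k : Nat) : Int) best = bestVal n.toNat := by
  intro fuel
  induction fuel with
  | zero =>
    intro k best hbest hfuel
    rw [Nat.add_zero] at hfuel
    rw [altLoop, hbest]
    congr 1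
    have h1 : (1 : Nat) ≤ 2 ^ k := Nat.one_le_two_pow
    omega
  | succ fuel ih =>
    intro k best hbest hfuel
    rw [altLoop]
    have h1 : (1 : Nat) ≤ 2 ^ k := Nat.one_le_two_pow
    have h2 : (2 : Nat) ^ (k + 1) = 2 * 2 ^ k := by rw [pow_succ]; ring
    by_cases hidx : ((2 * 2 ^ k : Nat) : Int) ≤ n
    · rw [if_pos hidx]
      have hidxN : (2 * 2 ^ k : Nat) ≤ n.toNat := by omega
      have hstep := level_step (2 ^ k) h1 (by rw [← h2]; exact gval_two_pow (k + 1))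
      simp only at hstep ⊢
      rw [hstep]
      -- the length of the new block
      have hlen : PySem.List.len ((List.range (2 * 2 ^ k)).map (fun t => gval (2 * 2 ^ k + t)))
          = ((2 * 2 ^ k : Nat) : Int) := by
        simp [PySem.List.len_eq]
      rw [hlen]
      -- the sliced max
      have hT0 : (0 : Int) ≤ n - ((2 * 2 ^ k : Nat) : Int) + 1 := by omega
      rw [PySem.List.slice_to _ hT0]
      have hTn : (n - ((2 * 2 ^ k : Nat) : Int) + 1).toNat = n.toNat - 2 * 2 ^ k + 1 := by omega
      rw [hTn, ← List.map_take, List.take_range]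
      set S := min (n.toNat - 2 * 2 ^ k + 1) (2 * 2 ^ k) with hS
      have hS1 : 1 ≤ S := by omega
      obtain ⟨S', hS'⟩ : ∃ S', S = S' + 1 := ⟨S - 1, by omega⟩
      have hmax : (PySem.List.max? ((List.range S).map (fun t => gval (2 * 2 ^ k + t)))
          (fun x => x)).getD 0
          = ((List.range S).map (fun t => gval (2 * 2 ^ k + t))).foldl max 0 := by
        rw [hS', List.range_succ_eq_map]
        simp only [List.map_cons]
        rw [maxD_cons_nonneg _ _ (by rw [Nat.add_zero, ← h2]; rw [gval_two_pow]; norm_num)]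
      rw [hmax]
      -- best' is bestVal up to min(n, 4·2^k − 1)
      have hminb : min n.toNat (2 * 2 ^ k - 1) = 2 * 2 ^ k - 1 := by omega
      have hbest' : max best (((List.range S).map (fun t => gval (2 * 2 ^ k + t))).foldl max 0)
          = bestVal (min n.toNat (2 * 2 ^ (k + 1) - 1)) := by
        have hm' : min n.toNat (2 * 2 ^ (k + 1) - 1) + 1 = 2 * 2 ^ k + S := by
          rw [h2]; omega
        rw [bestVal, hm', List.range_add, List.map_append, List.foldl_append]
        have hfirst : ((List.range (2 * 2 ^ k)).map gval).foldl max 0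
            = bestVal (2 * 2 ^ k - 1) := by
          rw [bestVal, Nat.sub_add_cancel (by omega : 1 ≤ 2 * 2 ^ k)]
        rw [hfirst, List.map_map]
        rw [show (gval ∘ fun i => 2 * 2 ^ k + i) = (fun t => gval (2 * 2 ^ k + t)) from rfl]
        have hmm := foldl_max_max ((List.range S).map (fun t => gval (2 * 2 ^ k + t)))
          (bestVal (2 * 2 ^ k - 1)) 0
        rw [max_eq_left (bestVal_nonneg _)] at hmm
        rw [hmm, hbest, hminb]
      rw [hbest']
      -- recurse at level k+1
      have hcast : ((2 * 2 ^ k : Nat) : Int) + ((2 * 2 ^ k : Nat) : Int)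
          = ((2 * 2 ^ (k + 1) : Nat) : Int) := by
        push_cast [pow_succ]
        ring
      rw [hcast]
      have hblock : (List.range (2 * 2 ^ k)).map (fun t => gval (2 * 2 ^ k + t))
          = (List.range (2 ^ (k + 1))).map (fun t => gval (2 ^ (k + 1) + t)) := by
        rw [h2]
      rw [hblock]
      exact ih (k + 1) _ rfl (by
        have : k + (fuel + 1) = (k + 1) + fuel := by omega
        rwa [this] at hfuel)
    · rw [if_neg hidx]
      rw [hbest]
      congr 1
      omega

-- ===== VERDICT (by name: the statement is the Claim_ definition above) =====
theorem getMaximumGenerated_spec : Claim_equal_getMaximumGenerated := by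
  intro n _
  unfold Spec_getMaximumGenerated getMaximumGenerated getMaximumGenerated_alt
  by_cases h0 : n = 0
  · simp [h0]
  · simp only [h0, if_false]
    rcases Int.lt_or_lt_of_ne h0 with hneg | hpos
    · -- negative n: A's loop body never runs, B's loop guard fails immediately; both return 1
      rw [PySem.List.pyRange_one_eq_nil (by omega), show n.toNat = 0 by omega]
      rw [altLoop, if_neg (by omega)]
      simp only [List.foldl_nil]
      decide
    · -- n ≥ 1
      obtain ⟨k, rfl⟩ : ∃ k : Nat, n = (k : Int) := ⟨n.toNat, by omega⟩
      have hk : 1 ≤ k := by exact_mod_cast hpos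
      rw [arr_spec k hk]
      have hA : (PySem.List.max? ((List.range (k + 1)).map gval) (fun x => x)).getD 0
          = bestVal k := by
        conv_lhs => rw [List.range_succ_eq_map]
        rw [List.map_cons, gval_zero, maxD_cons_nonneg _ _ le_rfl]
        rw [bestVal]
        conv_rhs => rw [List.range_succ_eq_map]
        rw [List.map_cons, gval_zero]
      rw [hA]
      have h1 : ((k : Int)).toNat = k := Int.toNat_natCast k
      rw [h1]
      have hinv := altLoop_inv (k : Int) (by exact_mod_cast hk) (k + 1) 0 1
        (by
          rw [h1]
          have : min k (2 * 2 ^ 0 - 1) = 1 := by omega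
          rw [this, bestVal]
          simp [List.range_succ, gval_zero, gval_one])
        (by
          rw [h1, Nat.zero_add]
          calc k < 2 ^ k := Nat.lt_two_pow_self
            _ ≤ 2 ^ (k + 1) := Nat.pow_le_pow_right (by norm_num) (by omega))
      rw [h1] at hinv
      have hb : (List.range (2 ^ 0)).map (fun t => gval (2 ^ 0 + t)) = [1] := by
        simp [gval_one]
      rw [hb] at hinv
      norm_num at hinv
      exact hinv.symm
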